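-- pv_equiv track=rewrite | github.com/MrBrantCode/unitest_baseline | mut_generate/mist_train_cf/cf_5168/solution.py | find_second_highest_prime
-- ===== SOURCE A (Python) =====
-- def find_second_highest_prime(numbers):
--     highest_prime = 0
--     second_highest_prime = 0
--
--     for num in numbers:
--         if num % 5 == 0:
--             continue
--
--         is_prime = True
--         for i in range(2, num):
--             if num % i == 0:
--                 is_prime = False
--                 break
--
--         if is_prime:
--             if num > highest_prime:
--                 second_highest_prime = highest_prime
--                 highest_prime = num
--             elif num > second_highest_prime and num != highest_prime:
--                 second_highest_prime = num
--
--     return second_highest_prime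
-- ===== SOURCE B (Python) =====
-- def find_second_highest_prime(numbers):
--     # Candidate test matching the task: no proper divisor in [2, n)
--     # checked by trial division up to sqrt(n) (asymptotically faster).
--     def has_no_proper_divisor(n):
--         d = 2
--         while d * d <= n:
--             if n % d == 0:
--                 return False
--             d += 1
--         return True
--
--     cands = {n for n in numbers if n % 5 != 0 and n >= 1 and has_no_proper_divisor(n)}
--     m1 = max(cands, default=0)
--     m2 = max((c for c in cands if c != m1), default=0)
--     return m2
-- ===== Notes on version B (the rewrite author's own statement) =====
-- stated objective: faster
-- what changed: B tests each candidate by trial division only up to sqrt(n) instead of A's scan over all of [2, n), and selects the answer by collecting the candidate set and taking two max passes instead of A's running highest/second-highest tracking.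
import Mathlib
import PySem

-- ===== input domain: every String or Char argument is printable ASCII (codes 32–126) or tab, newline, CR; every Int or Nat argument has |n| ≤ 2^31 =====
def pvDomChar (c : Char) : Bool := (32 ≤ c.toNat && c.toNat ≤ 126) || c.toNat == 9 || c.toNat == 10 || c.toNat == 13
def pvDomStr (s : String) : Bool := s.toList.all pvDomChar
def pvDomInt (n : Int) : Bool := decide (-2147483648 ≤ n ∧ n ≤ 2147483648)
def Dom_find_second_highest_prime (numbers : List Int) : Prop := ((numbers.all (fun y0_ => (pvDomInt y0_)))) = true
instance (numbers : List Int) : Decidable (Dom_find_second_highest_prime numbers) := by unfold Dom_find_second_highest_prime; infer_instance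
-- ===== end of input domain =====

-- B replaces A's per-element trial division over [2, n) by trial division up to sqrt(n)
-- and replaces A's running top-two tracking by collecting the candidate set and taking
-- two max passes; objective: faster (asymptotically cheaper primality test).


-- ===== PORT A =====
-- inner loop 'for i in range(2, num): if num % i == 0: is_prime = False; break'
-- (fuel = number of remaining range elements)
def aTrial (num i : Int) : Nat → Bool
  | 0 => true
  | f + 1 => if PySem.Int.mod num i = 0 then false else aTrial num (i + 1) f

-- body of A's 'for num in numbers' loop; state = (highest_prime, second_highest_prime)
def aStep (st : Int × Int) (num : Int) : Int × Int :=
  if PySem.Int.mod num 5 = 0 then st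
  else if aTrial num 2 (num - 2).toNat then
    if st.1 < num then (num, st.1)
    else if st.2 < num ∧ num ≠ st.1 then (st.1, num)
    else st
  else st

def find_second_highest_prime (numbers : List Int) : Int :=
  (numbers.foldl aStep (0, 0)).2

-- ===== PORT B =====
-- 'while d * d <= n: if n % d == 0: return False; d += 1; return True'  (fuel n.toNat suffices)
def bTrial (n d : Int) : Nat → Bool
  | 0 => true
  | f + 1 => if d * d ≤ n then (if PySem.Int.mod n d = 0 then false else bTrial n (d + 1) f) else true

-- 'n % 5 != 0 and n >= 1 and has_no_proper_divisor(n)'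
def bCand (n : Int) : Bool := decide (PySem.Int.mod n 5 ≠ 0) && decide (1 ≤ n) && bTrial n 2 n.toNat

-- the set comprehension '{n for n in numbers if ...}'
def bStep (s : PySem.Set Int) (n : Int) : PySem.Set Int :=
  if bCand n then PySem.Set.add s n else s

def find_second_highest_prime_alt (numbers : List Int) : Int :=
  let cands : PySem.Set Int := numbers.foldl bStep PySem.Set.empty
  let m1 := PySem.List.maxD cands (fun x => x) 0
  PySem.List.maxD (cands.filter (fun c => c != m1)) (fun x => x) 0

-- ===== PRECONDITION & SPEC =====
def Spec_find_second_highest_prime (numbers : List Int) (out : Int) : Prop := out = find_second_highest_prime_alt numbers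
instance (numbers : List Int) (out : Int) : Decidable (Spec_find_second_highest_prime numbers out) := by unfold Spec_find_second_highest_prime; infer_instance

-- ===== CLAIM (what is proved, stated in full; the proofs are below) =====
def Claim_equal_find_second_highest_prime : Prop := ∀ (numbers : List Int), Dom_find_second_highest_prime numbers → Spec_find_second_highest_prime numbers (find_second_highest_prime numbers)

-- ===== LEMMAS AND PROOFS =====

-- running max with start 0 (the value of max(l, default=0) for lists of nonnegatives)
def pvG (l : List Int) : Int := l.foldl max 0

theorem pvG_append (l : List Int) (n : Int) : pvG (l ++ [n]) = max (pvG l) n := by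
  simp [pvG]

theorem pvG_le (l : List Int) : ∀ x ∈ l, x ≤ pvG l :=
  (PySem.List.le_foldl_max l 0).2

theorem pvG_nonneg (l : List Int) : 0 ≤ pvG l :=
  (PySem.List.le_foldl_max l 0).1

theorem foldl_max_mem (t : List Int) : ∀ a : Int, t.foldl max a = a ∨ t.foldl max a ∈ t := by
  induction t with
  | nil => intro a; left; rfl
  | cons x t ih =>
    intro a
    rcases ih (max a x) with h | h
    · rw [List.foldl_cons, h]
      rcases max_cases a x with ⟨he, _⟩ | ⟨he, _⟩
      · left; exact he
      · right; simp [he]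
    · right; simp [h]

theorem pvG_mem (l : List Int) : pvG l = 0 ∨ pvG l ∈ l := foldl_max_mem l 0

theorem maxD_eq_pvG (l : List Int) (h : ∀ x ∈ l, 0 ≤ x) :
    PySem.List.maxD l (fun x => x) 0 = pvG l := by
  cases l with
  | nil => rfl
  | cons x t =>
    have hx : max 0 x = x := max_eq_right (h x (by simp))
    show (PySem.List.max? (x :: t) (fun y => y)).getD 0 = pvG (x :: t)
    rw [PySem.List.max?_id_cons]
    simp [pvG, hx]

theorem aTrial_iff (n : Int) : ∀ (f : Nat) (i : Int),
    (aTrial n i f = true ↔ ∀ j, i ≤ j → j < i + f → PySem.Int.mod n j ≠ 0) := by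
  intro f
  induction f with
  | zero =>
    intro i; simp [aTrial]
    intro j h1 h2; omega
  | succ f ih =>
    intro i
    simp only [aTrial]
    by_cases hm : PySem.Int.mod n i = 0
    · rw [if_pos hm]
      constructor
      · intro h; cases h
      · intro h; exact absurd hm (h i le_rfl (by push_cast; omega))
    · rw [if_neg hm, ih (i + 1)]
      constructor
      · intro h j h1 h2
        rcases eq_or_lt_of_le h1 with rfl | hlt
        · exact hm
        · exact h j (by omega) (by push_cast at h2 ⊢; omega)
      · intro h j h1 h2
        exact h j (by omega) (by push_cast at h1 h2 ⊢; omega)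

theorem bTrial_iff (n : Int) : ∀ (f : Nat) (d : Int), 2 ≤ d → n < (d + f) * (d + f) →
    (bTrial n d f = true ↔ ∀ j, d ≤ j → j * j ≤ n → PySem.Int.mod n j ≠ 0) := by
  intro f
  induction f with
  | zero =>
    intro d hd hlt
    simp only [bTrial, true_iff]
    intro j hj hjj
    have h1 : d * d ≤ j * j := mul_le_mul hj hj (by omega) (by omega)
    push_cast at hlt
    exfalso; nlinarith
  | succ f ih =>
    intro d hd hlt
    simp only [bTrial]
    by_cases hle : d * d ≤ n
    · rw [if_pos hle]
      by_cases hm : PySem.Int.mod n d = 0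
      · rw [if_pos hm]
        exact iff_of_false (by simp) (fun h => (h d le_rfl hle) hm)
      · rw [if_neg hm, ih (d + 1) (by omega) (by push_cast at hlt; nlinarith)]
        constructor
        · intro h j hj hjj
          rcases eq_or_lt_of_le hj with rfl | hlt'
          · exact hm
          · exact h j (by omega) hjj
        · intro h j hj hjj
          exact h j (by omega) hjj
    · rw [if_neg hle]
      simp only [true_iff]
      intro j hj hjj
      have h1 : d * d ≤ j * j := mul_le_mul hj hj (by omega) (by omega)
      exfalso; omega

theorem trial_bridge (n : Int) (_hn : 2 ≤ n) :
    (∀ j, 2 ≤ j → j < n → PySem.Int.mod n j ≠ 0) ↔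
    (∀ j, 2 ≤ j → j * j ≤ n → PySem.Int.mod n j ≠ 0) := by
  constructor
  · intro h j h2 hjj
    exact h j h2 (by nlinarith)
  · intro h j h2 hjn hmod
    have hdvd : j ∣ n := (PySem.Int.mod_eq_zero_iff_dvd n j).1 hmod
    obtain ⟨k, hk⟩ := hdvd
    have hk2 : 2 ≤ k := by
      have hk1 : 1 ≤ k := by nlinarith
      rcases eq_or_lt_of_le hk1 with rfl | _
      · omega
      · omega
    have hm2 : 2 ≤ min j k := le_min h2 hk2
    have hmm : min j k * min j k ≤ n := by
      rw [hk]
      exact mul_le_mul (min_le_left j k) (min_le_right j k) (by omega) (by omega)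
    have hmd : min j k ∣ n := by
      rcases min_cases j k with ⟨he, _⟩ | ⟨he, _⟩
      · rw [he, hk]; exact Dvd.intro k rfl
      · rw [he, hk]; exact Dvd.intro_left j rfl
    exact h (min j k) hm2 hmm ((PySem.Int.mod_eq_zero_iff_dvd n (min j k)).2 hmd)

theorem bTrial_small (n : Int) (hn : n < 4) : ∀ f, bTrial n 2 f = true := by
  intro f; cases f with
  | zero => rfl
  | succ f => simp only [bTrial]; rw [if_neg (by omega)]

theorem trial_eq (n : Int) : aTrial n 2 (n - 2).toNat = bTrial n 2 n.toNat := by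
  rcases lt_or_ge n 3 with h | h
  · have h1 : (n - 2).toNat = 0 := by omega
    rw [h1, bTrial_small n (by omega)]
    rfl
  · have hA := aTrial_iff n (n - 2).toNat 2
    have hB := bTrial_iff n n.toNat 2 (by omega) (by nlinarith [Int.toNat_of_nonneg (by omega : (0:Int) ≤ n)])
    have hcast : (2 : Int) + ((n - 2).toNat : Int) = n := by omega
    rw [hcast] at hA
    rw [Bool.eq_iff_iff, hA, hB]
    exact trial_bridge n (by omega)

-- bCand unfolding
theorem bCand_iff (n : Int) :
    bCand n = true ↔ (PySem.Int.mod n 5 ≠ 0 ∧ 1 ≤ n ∧ bTrial n 2 n.toNat = true) := by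
  simp [bCand, and_assoc]

-- one step preserves the invariant
theorem step_good (s : List Int) (st : Int × Int) (n : Int)
    (hnd : s.Nodup) (hpos : ∀ x ∈ s, 1 ≤ x)
    (h1 : st.1 = pvG s) (h2 : st.2 = pvG (s.filter (fun c => c != st.1))) :
    (bStep s n).Nodup ∧ (∀ x ∈ bStep s n, 1 ≤ x) ∧
      (aStep st n).1 = pvG (bStep s n) ∧
      (aStep st n).2 = pvG ((bStep s n).filter (fun c => c != (aStep st n).1)) := by
  by_cases hc : bCand n = true
  · obtain ⟨h5, hn1, hbt⟩ := (bCand_iff n).1 hc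
    simp only [bStep, if_pos hc, aStep, if_neg h5, trial_eq, if_pos hbt]
    have hG0 := pvG_nonneg s
    have hsp0 := pvG_nonneg (s.filter (fun c => c != st.1))
    have hspl : st.2 ≤ st.1 := by
      rw [h1, h2]
      rcases pvG_mem (s.filter (fun c => c != st.1)) with he | hm
      · rw [he]; exact pvG_nonneg s
      · exact pvG_le s _ (List.mem_of_mem_filter hm)
    by_cases hmem : n ∈ s
    · have hadd : PySem.Set.add s n = s := PySem.Set.add_of_mem hmem
      have hle : n ≤ st.1 := h1 ▸ pvG_le s n hmem
      have g1 : ¬ st.1 < n := by omega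
      have g2 : ¬ (st.2 < n ∧ n ≠ st.1) := by
        rintro ⟨ha, hb⟩
        have hmf : n ∈ s.filter (fun c => c != st.1) :=
          List.mem_filter.2 ⟨hmem, by simpa using hb⟩
        have := pvG_le _ n hmf
        rw [← h2] at this; omega
      rw [if_neg g1, if_neg g2, hadd]
      exact ⟨hnd, hpos, h1, h2⟩
    · have hadd : PySem.Set.add s n = s ++ [n] := PySem.Set.add_of_not_mem hmem
      rw [hadd]
      have hnd' : (s ++ [n]).Nodup := by
        rw [List.nodup_append]
        refine ⟨hnd, List.nodup_singleton n, ?_⟩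
        intro a ha b hb
        rw [List.mem_singleton] at hb
        subst hb
        exact fun he => hmem (he ▸ ha)
      have hpos' : ∀ x ∈ s ++ [n], 1 ≤ x := by
        intro x hx
        rcases List.mem_append.1 hx with hx | hx
        · exact hpos x hx
        · simp at hx; omega
      have hne : n ≠ st.1 := by
        intro he
        rcases pvG_mem s with h0 | hmm
        · rw [h1, h0] at he; omega
        · rw [h1] at he; exact hmem (he ▸ hmm)
      have hfs : s.filter (fun c => c != n) = s :=
        List.filter_eq_self.2 (fun x hx => by
          simp only [bne_iff_ne, ne_eq]
          intro he; exact hmem (he ▸ hx))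
      by_cases g1 : st.1 < n
      · rw [if_pos g1]
        refine ⟨hnd', hpos', ?_, ?_⟩
        · show n = pvG (s ++ [n])
          rw [pvG_append, ← h1]
          exact (max_eq_right (le_of_lt g1)).symm
        · show st.1 = pvG ((s ++ [n]).filter (fun c => c != n))
          rw [List.filter_append]
          have hf1 : [n].filter (fun c => c != n) = [] := by simp
          rw [hf1, hfs, List.append_nil, ← h1]
      · rw [if_neg g1]
        by_cases g2 : st.2 < n ∧ n ≠ st.1
        · rw [if_pos g2]
          refine ⟨hnd', hpos', ?_, ?_⟩
          · show st.1 = pvG (s ++ [n])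
            rw [pvG_append, ← h1]
            exact (max_eq_left (by omega)).symm
          · show n = pvG ((s ++ [n]).filter (fun c => c != st.1))
            rw [List.filter_append]
            have hf1 : [n].filter (fun c => c != st.1) = [n] := by simp [hne]
            rw [hf1, pvG_append, ← h2]
            exact (max_eq_right (le_of_lt g2.1)).symm
        · rw [if_neg g2]
          have hle2 : n ≤ st.2 := by
            rcases not_and_or.1 g2 with hx | hx
            · omega
            · exact absurd hne hx
          refine ⟨hnd', hpos', ?_, ?_⟩
          · show st.1 = pvG (s ++ [n])
            rw [pvG_append, ← h1]
            exact (max_eq_left (by omega)).symm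
          · show st.2 = pvG ((s ++ [n]).filter (fun c => c != st.1))
            rw [List.filter_append]
            have hf1 : [n].filter (fun c => c != st.1) = [n] := by simp [hne]
            rw [hf1, pvG_append, ← h2]
            exact (max_eq_left hle2).symm
  · simp only [bStep, if_neg hc]
    have hnc := hc
    rw [bCand_iff] at hnc
    simp only [not_and] at hnc
    by_cases h5 : PySem.Int.mod n 5 = 0
    · simp only [aStep, if_pos h5]
      exact ⟨hnd, hpos, h1, h2⟩
    · simp only [aStep, if_neg h5, trial_eq]
      by_cases hbt : bTrial n 2 n.toNat = true
      · have hn : ¬ 1 ≤ n := fun h => (hnc h5 h) hbt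
        have g1 : ¬ st.1 < n := by
          rw [h1]; have := pvG_nonneg s; omega
        have g2 : ¬ (st.2 < n ∧ n ≠ st.1) := by
          rintro ⟨ha, _⟩
          rw [h2] at ha
          have := pvG_nonneg (s.filter (fun c => c != st.1)); omega
        rw [if_pos hbt, if_neg g1, if_neg g2]
        exact ⟨hnd, hpos, h1, h2⟩
      · rw [if_neg hbt]
        exact ⟨hnd, hpos, h1, h2⟩

theorem fold_good : ∀ (numbers : List Int) (s : List Int) (st : Int × Int),
    s.Nodup → (∀ x ∈ s, 1 ≤ x) → st.1 = pvG s → st.2 = pvG (s.filter (fun c => c != st.1)) →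
    (numbers.foldl bStep s).Nodup ∧ (∀ x ∈ numbers.foldl bStep s, 1 ≤ x) ∧
      (numbers.foldl aStep st).1 = pvG (numbers.foldl bStep s) ∧
      (numbers.foldl aStep st).2 =
        pvG ((numbers.foldl bStep s).filter (fun c => c != (numbers.foldl aStep st).1)) := by
  intro numbers
  induction numbers with
  | nil => intro s st hnd hpos h1 h2; exact ⟨hnd, hpos, h1, h2⟩
  | cons n tl ih =>
    intro s st hnd hpos h1 h2
    obtain ⟨hnd', hpos', h1', h2'⟩ := step_good s st n hnd hpos h1 h2
    exact ih (bStep s n) (aStep st n) hnd' hpos' h1' h2'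

-- ===== VERDICT (by name: the statement is the Claim_ definition above) =====
theorem find_second_highest_prime_spec : Claim_equal_find_second_highest_prime := by
  intro numbers _
  show (numbers.foldl aStep (0, 0)).2 = find_second_highest_prime_alt numbers
  obtain ⟨hnd, hpos, h1, h2⟩ := fold_good numbers [] (0, 0) (by simp) (by simp) rfl rfl
  have halt : find_second_highest_prime_alt numbers =
      PySem.List.maxD ((numbers.foldl bStep []).filter
        (fun c => c != PySem.List.maxD (numbers.foldl bStep []) (fun x => x) 0)) (fun x => x) 0 := rfl
  rw [halt]
  have e1 : PySem.List.maxD (numbers.foldl bStep []) (fun x => x) 0 = pvG (numbers.foldl bStep []) :=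
    maxD_eq_pvG _ (fun x hx => by have := hpos x hx; omega)
  rw [e1, ← h1, h2]
  exact (maxD_eq_pvG _ (fun x hx => by
    have := hpos x (List.mem_of_mem_filter hx); omega)).symm
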